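-- pv_equiv track=rewrite | github.com/NathanZK/Competitive-Programming | Sources and sinks.py | sourceSink
-- ===== SOURCE A (Python) =====
-- def sourceSink(adjMat):
--     sources = []
--     sinks = []
--
--     for row in range(len(adjMat)):
--         num1 = 0
--         for col in range(len(adjMat[row])):
--             if adjMat[row][col] == 1:
--                 num1 = 1
--                 break
--
--         if num1 == 0:
--             sinks.append(row+1)
--
--     for col in range(len(adjMat[0])):
--         num1 = 0
--         for row in range(len(adjMat)):
--             if adjMat[row][col] == 1:
--                 num1 = 1
--                 break
--
--         if num1 == 0:
--             sources.append(col+1)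
--
--     return sources, sinks
-- ===== SOURCE B (Python) =====
-- def sourceSink(adjMat):
--     # One combined pass: record which rows / which columns contain a 1,
--     # then emit sources and sinks in two flat passes.
--     ncols = len(adjMat[0])
--     rows_with_one = set()
--     cols_with_one = set()
--     for i, row in enumerate(adjMat):
--         for j, v in enumerate(row):
--             if v == 1:
--                 rows_with_one.add(i)
--                 cols_with_one.add(j)
--     sources = [j + 1 for j in range(ncols) if j not in cols_with_one]
--     sinks = [i + 1 for i in range(len(adjMat)) if i not in rows_with_one]
--     return sources, sinks
-- ===== Notes on version B (the rewrite author's own statement) =====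
-- stated objective: alternative
-- what changed: Replaces A's two separate early-breaking nested scans (one per row for sinks, one per column for sources) by a single combined pass that collects the sets of row and column indices containing a 1, followed by two flat emission passes over the index ranges.
-- outside the precondition, e.g. on sourceSink([]): A raises IndexError, B raises IndexError; on sourceSink([[1, 1], [1]]): A returns ([], []), B returns ([], []); on sourceSink([[0, 0], [0]]): A raises IndexError, B returns ([1, 2], [1, 2])
import Mathlib
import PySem

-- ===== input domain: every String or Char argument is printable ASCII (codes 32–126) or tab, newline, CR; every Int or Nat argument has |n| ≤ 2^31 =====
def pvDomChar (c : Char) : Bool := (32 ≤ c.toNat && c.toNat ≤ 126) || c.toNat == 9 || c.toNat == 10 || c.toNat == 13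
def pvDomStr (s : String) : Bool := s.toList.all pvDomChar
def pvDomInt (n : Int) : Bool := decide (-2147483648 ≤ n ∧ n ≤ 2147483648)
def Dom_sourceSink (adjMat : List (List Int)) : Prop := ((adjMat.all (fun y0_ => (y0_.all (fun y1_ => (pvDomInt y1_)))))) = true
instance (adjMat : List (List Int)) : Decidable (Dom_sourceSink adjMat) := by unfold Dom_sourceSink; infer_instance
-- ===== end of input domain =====

-- B replaces A's two early-breaking nested scans by one combined pass building the
-- sets of row/column indices that contain a 1, plus two flat emission passes.
-- Return-value equivalence only (neither version mutates its argument).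

-- ===== PORT A =====
-- inner 'for col in range(len(adjMat[row])): if adjMat[row][col] == 1: num1 = 1; break'
def pvARowLoop (row : List Int) : List Int → Int
  | [] => 0
  | c :: cs => if PySem.List.pyGetD row c 0 = 1 then 1 else pvARowLoop row cs

-- inner 'for row in range(len(adjMat)): if adjMat[row][col] == 1: num1 = 1; break'
def pvAColLoop (adjMat : List (List Int)) (c : Int) : List Int → Int
  | [] => 0
  | r :: rs => if PySem.List.pyGetD (PySem.List.pyGetD adjMat r []) c 0 = 1 then 1
               else pvAColLoop adjMat c rs

def sourceSink (adjMat : List (List Int)) : List Int × List Int :=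
  let sinks := (PySem.List.pyRange 0 (adjMat.length : Int) 1).foldl
    (fun sinks row =>
      let num1 := pvARowLoop (PySem.List.pyGetD adjMat row [])
        (PySem.List.pyRange 0 (((PySem.List.pyGetD adjMat row []).length : Int)) 1)
      if num1 = 0 then sinks ++ [row + 1] else sinks) []
  let sources := (PySem.List.pyRange 0 (((adjMat.headD []).length : Int)) 1).foldl
    (fun sources col =>
      let num1 := pvAColLoop adjMat col (PySem.List.pyRange 0 (adjMat.length : Int) 1)
      if num1 = 0 then sources ++ [col + 1] else sources) []
  (sources, sinks)

-- ===== PORT B =====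
def sourceSink_alt (adjMat : List (List Int)) : List Int × List Int :=
  let ncols : Int := ((adjMat.headD []).length : Int)
  let st := (PySem.List.enumerate adjMat 0).foldl
    (fun (st : PySem.Set Int × PySem.Set Int) p =>
      (PySem.List.enumerate p.2 0).foldl
        (fun st q =>
          if q.2 = 1 then (PySem.Set.add st.1 p.1, PySem.Set.add st.2 q.1) else st) st)
    (PySem.Set.empty, PySem.Set.empty)
  let sources := ((PySem.List.pyRange 0 ncols 1).filter
      (fun j => !(PySem.Set.contains st.2 j))).map (· + 1)
  let sinks := ((PySem.List.pyRange 0 (adjMat.length : Int) 1).filter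
      (fun i => !(PySem.Set.contains st.1 i))).map (· + 1)
  (sources, sinks)

-- ===== PRECONDITION & SPEC =====
-- Pre_ excludes the empty matrix (A raises IndexError on adjMat[0]) and ragged matrices
-- with a later row shorter than the first row, on which A's column scan can index out of
-- range (IndexError); where such a ragged matrix happens to return, A agrees with B anyway.
def Pre_sourceSink (adjMat : List (List Int)) : Prop :=
  adjMat ≠ [] ∧ ∀ row ∈ adjMat, (adjMat.headD []).length ≤ row.length
instance (adjMat : List (List Int)) : Decidable (Pre_sourceSink adjMat) := by
  unfold Pre_sourceSink; infer_instance

def pvWitness_sourceSink : List (List Int) := [[0, 1], [0, 0]]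

def Spec_sourceSink (adjMat : List (List Int)) (out : List Int × List Int) : Prop :=
  out = sourceSink_alt adjMat
instance (adjMat : List (List Int)) (out : List Int × List Int) :
    Decidable (Spec_sourceSink adjMat out) := by unfold Spec_sourceSink; infer_instance

-- ===== CLAIM (what is proved, stated in full; the proofs are below) =====
def Claim_equal_sourceSink : Prop :=
  ∀ (adjMat : List (List Int)), Dom_sourceSink adjMat → Pre_sourceSink adjMat →
    Spec_sourceSink adjMat (sourceSink adjMat)

-- ===== LEMMAS AND PROOFS =====

theorem pvARowLoop_eq (row : List Int) (cs : List Int) :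
    pvARowLoop row cs = if ∃ c ∈ cs, PySem.List.pyGetD row c 0 = 1 then 1 else 0 := by
  induction cs with
  | nil => simp [pvARowLoop]
  | cons c cs ih =>
    simp only [pvARowLoop, ih, List.mem_cons]
    by_cases h : PySem.List.pyGetD row c 0 = 1 <;> split_ifs with h2 <;> simp_all <;> tauto

theorem pvAColLoop_eq (adjMat : List (List Int)) (c : Int) (rs : List Int) :
    pvAColLoop adjMat c rs =
      if ∃ r ∈ rs, PySem.List.pyGetD (PySem.List.pyGetD adjMat r []) c 0 = 1 then 1 else 0 := by
  induction rs with
  | nil => simp [pvAColLoop]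
  | cons r rs ih =>
    simp only [pvAColLoop, ih, List.mem_cons]
    by_cases h : PySem.List.pyGetD (PySem.List.pyGetD adjMat r []) c 0 = 1 <;>
      split_ifs with h2 <;> simp_all <;> tauto

-- membership characterisation of B's combined pass (generalized over the enumerate start)
theorem pvB_inner_mem1 (i : Int) (row : List Int) (s : Int) (st : PySem.Set Int × PySem.Set Int)
    (x : Int) :
    (x ∈ ((PySem.List.enumerate row s).foldl
        (fun st q =>
          if q.2 = 1 then (PySem.Set.add st.1 i, PySem.Set.add st.2 q.1) else st) st).1 ↔
      x ∈ st.1 ∨ ((1 : Int) ∈ row ∧ x = i)) := by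
  induction row generalizing s st with
  | nil => simp [PySem.List.enumerate_nil]
  | cons v row ih =>
    rw [PySem.List.enumerate_cons]
    simp only [List.foldl_cons, ih]
    by_cases hv : v = 1 <;> simp [hv, PySem.Set.mem_add] <;> tauto

theorem pvB_inner_mem2 (i : Int) (row : List Int) (s : Int) (st : PySem.Set Int × PySem.Set Int)
    (x : Int) :
    (x ∈ ((PySem.List.enumerate row s).foldl
        (fun st q =>
          if q.2 = 1 then (PySem.Set.add st.1 i, PySem.Set.add st.2 q.1) else st) st).2 ↔
      x ∈ st.2 ∨ ∃ k : Nat, ∃ _ : k < row.length, row[k] = 1 ∧ x = s + (k : Int)) := by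
  induction row generalizing s st with
  | nil => simp [PySem.List.enumerate_nil]
  | cons v row ih =>
    rw [PySem.List.enumerate_cons]
    simp only [List.foldl_cons, ih]
    constructor
    · rintro (h | ⟨k, hk, h1, hx⟩)
      · by_cases hv : v = 1
        · simp [hv, PySem.Set.mem_add] at h
          rcases h with h | h
          · exact Or.inl h
          · exact Or.inr ⟨0, by simp, by simp [hv], by omega⟩
        · simp [hv] at h; exact Or.inl h
      · exact Or.inr ⟨k + 1, by simp only [List.length_cons]; omega, by simpa using h1, by push_cast; omega⟩
    · rintro (h | ⟨k, hk, h1, hx⟩)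
      · left; by_cases hv : v = 1 <;> simp [hv, PySem.Set.mem_add, h]
      · match k, hk with
        | 0, _ =>
          left
          simp at h1
          simp [h1, PySem.Set.mem_add]
          right; omega
        | k + 1, hk =>
          right
          exact ⟨k, by simp only [List.length_cons] at hk; omega, by simpa using h1, by push_cast at hx ⊢; omega⟩

theorem pvB_outer_mem1 (adjMat : List (List Int)) (s : Int)
    (st : PySem.Set Int × PySem.Set Int) (x : Int) :
    (x ∈ ((PySem.List.enumerate adjMat s).foldl
        (fun (st : PySem.Set Int × PySem.Set Int) p =>
          (PySem.List.enumerate p.2 0).foldl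
            (fun st q =>
              if q.2 = 1 then (PySem.Set.add st.1 p.1, PySem.Set.add st.2 q.1) else st) st) st).1 ↔
      x ∈ st.1 ∨ ∃ k : Nat, ∃ _ : k < adjMat.length, (1 : Int) ∈ adjMat[k] ∧ x = s + (k : Int)) := by
  induction adjMat generalizing s st with
  | nil => simp [PySem.List.enumerate_nil]
  | cons row rest ih =>
    rw [PySem.List.enumerate_cons]
    simp only [List.foldl_cons, ih, pvB_inner_mem1]
    constructor
    · rintro ((h | ⟨h1, hx⟩) | ⟨k, hk, h1, hx⟩)
      · exact Or.inl h
      · exact Or.inr ⟨0, by simp, by simpa using h1, by omega⟩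
      · exact Or.inr ⟨k + 1, by simp only [List.length_cons]; omega, by simpa using h1, by push_cast; omega⟩
    · rintro (h | ⟨k, hk, h1, hx⟩)
      · exact Or.inl (Or.inl h)
      · match k, hk with
        | 0, _ => exact Or.inl (Or.inr ⟨by simpa using h1, by omega⟩)
        | k + 1, hk =>
          exact Or.inr ⟨k, by simp only [List.length_cons] at hk; omega, by simpa using h1, by push_cast at hx ⊢; omega⟩

theorem pvB_outer_mem2 (adjMat : List (List Int)) (s : Int)
    (st : PySem.Set Int × PySem.Set Int) (x : Int) :
    (x ∈ ((PySem.List.enumerate adjMat s).foldl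
        (fun (st : PySem.Set Int × PySem.Set Int) p =>
          (PySem.List.enumerate p.2 0).foldl
            (fun st q =>
              if q.2 = 1 then (PySem.Set.add st.1 p.1, PySem.Set.add st.2 q.1) else st) st) st).2 ↔
      x ∈ st.2 ∨ ∃ k : Nat, ∃ _ : k < adjMat.length, ∃ j : Nat, ∃ _ : j < adjMat[k].length,
        adjMat[k][j] = 1 ∧ x = (j : Int)) := by
  induction adjMat generalizing s st with
  | nil => simp [PySem.List.enumerate_nil]
  | cons row rest ih =>
    rw [PySem.List.enumerate_cons]
    simp only [List.foldl_cons, ih, pvB_inner_mem2]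
    constructor
    · rintro ((h | ⟨j, hj, h1, hx⟩) | ⟨k, hk, j, hj, h1, hx⟩)
      · exact Or.inl h
      · exact Or.inr ⟨0, by simp, j, by simpa using hj, by simpa using h1, by omega⟩
      · exact Or.inr ⟨k + 1, by simp only [List.length_cons]; omega, j, by simpa using hj, by simpa using h1, hx⟩
    · rintro (h | ⟨k, hk, j, hj, h1, hx⟩)
      · exact Or.inl (Or.inl h)
      · match k, hk with
        | 0, _ =>
          exact Or.inl (Or.inr ⟨j, by simpa using hj, by simpa using h1, by omega⟩)
        | k + 1, hk =>
          exact Or.inr ⟨k, by simp only [List.length_cons] at hk; omega, j, by simpa using hj, by simpa using h1, hx⟩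

-- A's inner row scan finds a 1 iff the row contains 1
theorem pvA_row_iff (row : List Int) :
    (∃ c ∈ PySem.List.pyRange 0 (row.length : Int) 1, PySem.List.pyGetD row c 0 = 1) ↔
      (1 : Int) ∈ row := by
  constructor
  · rintro ⟨c, hc, h1⟩
    rw [PySem.List.mem_pyRange_one] at hc
    rw [PySem.List.pyGetD_eq_getElem row 0 hc.1 (by exact_mod_cast hc.2)] at h1
    exact h1 ▸ List.getElem_mem _
  · intro h
    obtain ⟨k, hk, hke⟩ := List.getElem_of_mem h
    exact ⟨(k : Int), by rw [PySem.List.mem_pyRange_one]; omega,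
      by rw [PySem.List.pyGetD_natCast]; simp [List.getD_eq_getElem?_getD, hk, hke]⟩

theorem pvSinks_iff (adjMat : List (List Int)) (r : Int) (h0 : 0 ≤ r)
    (h1 : r < (adjMat.length : Int)) :
    ((1 : Int) ∈ PySem.List.pyGetD adjMat r [] ↔
      ∃ k : Nat, ∃ _ : k < adjMat.length, (1 : Int) ∈ adjMat[k] ∧ r = 0 + (k : Int)) := by
  rw [PySem.List.pyGetD_eq_getElem adjMat [] h0 h1]
  constructor
  · intro h
    exact ⟨r.toNat, by omega, h, by omega⟩
  · rintro ⟨k, hk, hmem, hr⟩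
    obtain rfl : k = r.toNat := by omega
    exact hmem

theorem pvSources_iff (adjMat : List (List Int)) (c : Int)
    (hlen : ∀ row ∈ adjMat, (adjMat.headD []).length ≤ row.length)
    (h0 : 0 ≤ c) (h1 : c < ((adjMat.headD []).length : Int)) :
    ((∃ r ∈ PySem.List.pyRange 0 ((adjMat.length : Int)) 1,
        PySem.List.pyGetD (PySem.List.pyGetD adjMat r []) c 0 = 1) ↔
      ∃ k : Nat, ∃ _ : k < adjMat.length, ∃ j : Nat, ∃ _ : j < adjMat[k].length,
        adjMat[k][j] = 1 ∧ c = (j : Int)) := by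
  constructor
  · rintro ⟨r, hr, hone⟩
    rw [PySem.List.mem_pyRange_one] at hr
    rw [PySem.List.pyGetD_eq_getElem adjMat [] hr.1 hr.2] at hone
    have hrowlen : (adjMat.headD []).length ≤ (adjMat[r.toNat]'(by omega)).length :=
      hlen _ (List.getElem_mem _)
    rw [PySem.List.pyGetD_eq_getElem _ 0 h0 (by omega)] at hone
    refine ⟨r.toNat, by omega, c.toNat, by omega, hone, by omega⟩
  · rintro ⟨k, hk, j, hj, hone, hcj⟩
    refine ⟨(k : Int), by rw [PySem.List.mem_pyRange_one]; omega, ?_⟩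
    rw [PySem.List.pyGetD_natCast, List.getD_eq_getElem _ _ hk, hcj,
      PySem.List.pyGetD_natCast, List.getD_eq_getElem _ _ hj]
    exact hone

-- ===== VERDICT (by name: the statement is the Claim_ definition above) =====
theorem sourceSink_spec : Claim_equal_sourceSink := by
  intro adjMat _ hpre
  obtain ⟨hne, hlen⟩ := hpre
  simp only [Spec_sourceSink, sourceSink, sourceSink_alt]
  rw [PySem.List.foldl_append_ite (fun row => pvARowLoop (PySem.List.pyGetD adjMat row [])
        (PySem.List.pyRange 0 (((PySem.List.pyGetD adjMat row []).length : Int)) 1) = 0)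
      (fun row => row + 1),
      PySem.List.foldl_append_ite (fun col => pvAColLoop adjMat col
        (PySem.List.pyRange 0 ((adjMat.length : Int)) 1) = 0) (fun col => col + 1)]
  simp only [List.nil_append, Prod.mk.injEq]
  constructor
  · -- sources
    apply congrArg
    apply List.filter_congr
    intro c hc
    rw [PySem.List.mem_pyRange_one] at hc
    rw [Bool.eq_iff_iff]
    simp only [decide_eq_true_eq, Bool.not_eq_true', Bool.eq_false_iff, ne_eq,
      PySem.Set.contains_iff]
    rw [pvAColLoop_eq, pvB_outer_mem2]
    simp only [PySem.Set.empty, List.not_mem_nil, false_or]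
    simp only [pvSources_iff adjMat c hlen hc.1 hc.2]
    split_ifs with h <;> simp only [one_ne_zero, false_iff, not_exists, not_and,
      true_iff]
    · obtain ⟨k, hk, j, hj, h1, hcj⟩ := h
      exact fun hcon => hcon k hk j hj h1 hcj
    · intro k hk j hj h1 hcj
      exact h ⟨k, hk, j, hj, h1, hcj⟩
  · -- sinks
    apply congrArg
    apply List.filter_congr
    intro r hr
    rw [PySem.List.mem_pyRange_one] at hr
    rw [Bool.eq_iff_iff]
    simp only [decide_eq_true_eq, Bool.not_eq_true', Bool.eq_false_iff, ne_eq,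
      PySem.Set.contains_iff]
    rw [pvARowLoop_eq, pvB_outer_mem1]
    simp only [PySem.Set.empty, List.not_mem_nil, false_or]
    simp only [pvA_row_iff, pvSinks_iff adjMat r hr.1 hr.2]
    split_ifs with h <;> simp only [one_ne_zero, false_iff, not_exists, not_and,
      true_iff]
    · obtain ⟨k, hk, h1, hrk⟩ := h
      exact fun hcon => hcon k hk h1 hrk
    · intro k hk h1 hrk
      exact h ⟨k, hk, h1, by omega⟩
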